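-- pv_equiv track=rewrite | github.com/konmin123/Leetcode_ | 11. Container With Most Water.py | max_area_brutal
-- ===== SOURCE A (Python) =====
-- from typing import List
--
-- def max_area_brutal(height: List[int]) -> int:
--     max_area = 1
--     for index_left, left in enumerate(height):
--         for index_right, right in enumerate(height[index_left + 1:]):
--             min_border = min(left, right)
--             len_ = index_right + 1
--             if min_border * len_ > max_area:
--                 max_area = min_border * len_
--     return max_area
-- ===== SOURCE B (Python) =====
-- from typing import List
--
-- def max_area_brutal(height: List[int]) -> int:
--     best = 1
--     l, r = 0, len(height) - 1
--     while l < r: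
--         area = min(height[l], height[r]) * (r - l)
--         if area > best:
--             best = area
--         if height[l] <= height[r]:
--             l += 1
--         else:
--             r -= 1
--     return best
-- ===== Notes on version B (the rewrite author's own statement) =====
-- stated objective: faster
-- what changed: Replaces the O(n^2) scan over all pairs with the classic two-pointer sweep from both ends that moves the shorter line inward.
import Mathlib
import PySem

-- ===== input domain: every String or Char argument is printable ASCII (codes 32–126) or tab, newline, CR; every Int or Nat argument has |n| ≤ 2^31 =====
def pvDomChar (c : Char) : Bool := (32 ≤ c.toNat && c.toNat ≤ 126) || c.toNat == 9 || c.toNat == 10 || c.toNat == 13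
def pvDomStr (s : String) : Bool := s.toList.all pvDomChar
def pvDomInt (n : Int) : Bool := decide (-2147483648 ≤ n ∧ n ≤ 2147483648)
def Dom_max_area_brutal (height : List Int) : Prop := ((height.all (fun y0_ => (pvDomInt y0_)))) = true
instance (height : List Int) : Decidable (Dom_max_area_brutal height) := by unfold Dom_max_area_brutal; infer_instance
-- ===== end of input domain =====

-- B replaces A's O(n^2) all-pairs scan by the two-pointer sweep from both ends (objective: faster).

-- ===== PORT A =====
-- literal transliteration of A's nested enumerate loops with the running maximum initialised to 1
def max_area_brutal (height : List Int) : Int :=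
  (PySem.List.enumerate height 0).foldl
    (fun max_area p =>
      (PySem.List.enumerate (PySem.List.slice height (some (p.1 + 1)) none) 0).foldl
        (fun max_area q =>
          let min_border := min p.2 q.2
          let len_ := q.1 + 1
          if min_border * len_ > max_area then min_border * len_ else max_area)
        max_area)
    1

-- ===== PORT B =====
-- the two-pointer loop of Source B: while l < r, record the area, move the shorter side inward
def pvTwoPtr (h : List Int) (l r : Nat) (best : Int) : Int :=
  if hlr : l < r then
    let area := min (h.getD l 0) (h.getD r 0) * ((r : Int) - (l : Int))
    let best' := if area > best then area else best
    if h.getD l 0 ≤ h.getD r 0 then pvTwoPtr h (l + 1) r best'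
    else pvTwoPtr h l (r - 1) best'
  else best
termination_by r - l
decreasing_by
  · omega
  · omega

def max_area_brutal_alt (height : List Int) : Int :=
  pvTwoPtr height 0 (height.length - 1) 1

-- ===== PRECONDITION & SPEC =====
def Spec_max_area_brutal (height : List Int) (out : Int) : Prop := out = max_area_brutal_alt height
instance (height : List Int) (out : Int) : Decidable (Spec_max_area_brutal height out) := by unfold Spec_max_area_brutal; infer_instance

-- ===== CLAIM (what is proved, stated in full; the proofs are below) =====
def Claim_equal_max_area_brutal : Prop := ∀ (height : List Int), Dom_max_area_brutal height → Spec_max_area_brutal height (max_area_brutal height)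

-- ===== LEMMAS AND PROOFS =====

-- the area of the container between lines i < j (indices in range on every use below)
def pvArea (h : List Int) (i j : Nat) : Int :=
  min (h.getD i 0) (h.getD j 0) * ((j : Int) - (i : Int))

-- characterisation of the common result: at least 1, an upper bound on every pair's area,
-- and either 1 or attained by some pair
def pvBest (h : List Int) (v : Int) : Prop :=
  1 ≤ v ∧ (∀ i j, i < j → j < h.length → pvArea h i j ≤ v) ∧
    (v = 1 ∨ ∃ i j, i < j ∧ j < h.length ∧ v = pvArea h i j)

theorem pvBest_unique {h : List Int} {v w : Int} (hv : pvBest h v) (hw : pvBest h w) : v = w := by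
  obtain ⟨hv1, hvB, hvA⟩ := hv
  obtain ⟨hw1, hwB, hwA⟩ := hw
  apply le_antisymm
  · rcases hvA with rfl | ⟨i, j, hij, hj, rfl⟩
    · exact hw1
    · exact hwB i j hij hj
  · rcases hwA with rfl | ⟨i, j, hij, hj, rfl⟩
    · exact hv1
    · exact hvB i j hij hj

-- running max via `if _ > _`: init ≤ result, every f x ≤ result, result attained or = init
theorem foldl_ifmax {β : Type} (f : β → Int) :
    ∀ (xs : List β) (a : Int),
      a ≤ xs.foldl (fun acc q => if f q > acc then f q else acc) a ∧
      (∀ q ∈ xs, f q ≤ xs.foldl (fun acc q => if f q > acc then f q else acc) a) ∧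
      (xs.foldl (fun acc q => if f q > acc then f q else acc) a = a ∨
        ∃ q ∈ xs, xs.foldl (fun acc q => if f q > acc then f q else acc) a = f q) := by
  intro xs
  induction xs with
  | nil => intro a; refine ⟨le_refl _, by simp, Or.inl rfl⟩
  | cons x xs ih =>
    intro a
    have key : (x :: xs).foldl (fun acc q => if f q > acc then f q else acc) a =
        xs.foldl (fun acc q => if f q > acc then f q else acc)
          (if f x > a then f x else a) := rfl
    obtain ⟨h1, h2, h3⟩ := ih (if f x > a then f x else a)
    refine ⟨?_, ?_, ?_⟩
    · rw [key]; exact le_trans (by split_ifs with hx <;> omega) h1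
    · intro q hq
      rcases List.mem_cons.mp hq with rfl | hq
      · rw [key]; exact le_trans (by split_ifs with hx <;> omega) h1
      · rw [key]; exact h2 q hq
    · rw [key]
      rcases h3 with heq | ⟨q, hq, hval⟩
      · by_cases hx : f x > a
        · right; exact ⟨x, List.mem_cons_self, by rw [heq]; simp [hx]⟩
        · left; rw [heq]; simp [hx]
      · right; exact ⟨q, List.mem_cons_of_mem _ hq, hval⟩

-- the nested fold of port A: same three properties, over all (p, q) with q in the p-indexed inner list
theorem foldl_nested {α β : Type} (L : α → List β) (g : α → β → Int) :
    ∀ (xs : List α) (a : Int),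
      a ≤ xs.foldl (fun acc p => (L p).foldl (fun a2 q => if g p q > a2 then g p q else a2) acc) a ∧
      (∀ p ∈ xs, ∀ q ∈ L p, g p q ≤ xs.foldl (fun acc p => (L p).foldl (fun a2 q => if g p q > a2 then g p q else a2) acc) a) ∧
      (xs.foldl (fun acc p => (L p).foldl (fun a2 q => if g p q > a2 then g p q else a2) acc) a = a ∨
        ∃ p ∈ xs, ∃ q ∈ L p, xs.foldl (fun acc p => (L p).foldl (fun a2 q => if g p q > a2 then g p q else a2) acc) a = g p q) := by
  intro xs
  induction xs with
  | nil => intro a; exact ⟨le_refl _, by simp, Or.inl rfl⟩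
  | cons x xs ih =>
    intro a
    have key : (x :: xs).foldl (fun acc p => (L p).foldl (fun a2 q => if g p q > a2 then g p q else a2) acc) a =
        xs.foldl (fun acc p => (L p).foldl (fun a2 q => if g p q > a2 then g p q else a2) acc)
          ((L x).foldl (fun a2 q => if g x q > a2 then g x q else a2) a) := rfl
    obtain ⟨hi1, hi2, hi3⟩ := foldl_ifmax (g x) (L x) a
    obtain ⟨h1, h2, h3⟩ := ih ((L x).foldl (fun a2 q => if g x q > a2 then g x q else a2) a)
    refine ⟨?_, ?_, ?_⟩
    · rw [key]; exact le_trans hi1 h1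
    · intro p hp q hq
      rcases List.mem_cons.mp hp with rfl | hp
      · rw [key]; exact le_trans (hi2 q hq) h1
      · rw [key]; exact h2 p hp q hq
    · rw [key]
      rcases h3 with heq | ⟨p, hp, q, hq, hval⟩
      · rcases hi3 with heq2 | ⟨q, hq, hval⟩
        · left; rw [heq, heq2]
        · right; exact ⟨x, List.mem_cons_self, q, hq, by rw [heq, hval]⟩
      · right; exact ⟨p, List.mem_cons_of_mem _ hp, q, hq, hval⟩

-- membership in A's inner enumerate list, decoded to an absolute index
theorem inner_mem_decode (h : List Int) (k : Nat) (hk : k < h.length) (q : Int × Int) :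
    q ∈ PySem.List.enumerate (PySem.List.slice h (some ((k : Int) + 1)) none) 0 ↔
      ∃ m : Nat, k + 1 + m < h.length ∧ q = ((m : Int), h.getD (k + 1 + m) 0) := by
  have hs : PySem.List.slice h (some ((k : Int) + 1)) none = h.drop (k + 1) := by
    have := PySem.List.slice_from_natCast h (k + 1)
    simpa using this
  rw [hs, PySem.List.mem_enumerate_iff]
  constructor
  · rintro ⟨m, hm, rfl⟩
    have hm' : k + 1 + m < h.length := by
      rw [List.length_drop] at hm
      omega
    refine ⟨m, hm', ?_⟩
    have hg : (h.drop (k + 1))[m] = h[k + 1 + m]'(by omega) := by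
      rw [List.getElem_drop]
    rw [List.getD_eq_getElem h 0 (by omega : k + 1 + m < h.length)]
    simp [hg]
  · rintro ⟨m, hm, rfl⟩
    have hmlen : m < (h.drop (k + 1)).length := by
      rw [List.length_drop]; omega
    refine ⟨m, hmlen, ?_⟩
    have hg : (h.drop (k + 1))[m] = h[k + 1 + m]'(by omega) := by
      rw [List.getElem_drop]
    rw [List.getD_eq_getElem h 0 (by omega : k + 1 + m < h.length)]
    simp [hg]

-- port A computes a value with the pvBest characterisation
theorem pvBest_A (h : List Int) : pvBest h (max_area_brutal h) := by
  have main := foldl_nested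
    (fun p : Int × Int => PySem.List.enumerate (PySem.List.slice h (some (p.1 + 1)) none) 0)
    (fun p q : Int × Int => min p.2 q.2 * (q.1 + 1))
    (PySem.List.enumerate h 0) 1
  have hA : max_area_brutal h =
      (PySem.List.enumerate h 0).foldl
        (fun acc p => ((fun p : Int × Int => PySem.List.enumerate (PySem.List.slice h (some (p.1 + 1)) none) 0) p).foldl
          (fun a2 q => if (fun p q : Int × Int => min p.2 q.2 * (q.1 + 1)) p q > a2
            then (fun p q : Int × Int => min p.2 q.2 * (q.1 + 1)) p q else a2) acc) 1 := by
    unfold max_area_brutal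
    simp
  obtain ⟨h1, h2, h3⟩ := main
  rw [hA]
  refine ⟨h1, ?_, ?_⟩
  · intro i j hij hj
    have hpmem : ((i : Int), h.getD i 0) ∈ PySem.List.enumerate h 0 := by
      rw [PySem.List.mem_enumerate_iff]
      refine ⟨i, by omega, ?_⟩
      rw [List.getD_eq_getElem h 0 (by omega : i < h.length)]
      simp
    have hqmem : (((j - i - 1 : Nat) : Int), h.getD j 0) ∈
        PySem.List.enumerate (PySem.List.slice h (some ((i : Int) + 1)) none) 0 := by
      rw [inner_mem_decode h i (by omega)]
      refine ⟨j - i - 1, by omega, ?_⟩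
      have : i + 1 + (j - i - 1) = j := by omega
      rw [this]
    have hle := h2 ((i : Int), h.getD i 0) hpmem (((j - i - 1 : Nat) : Int), h.getD j 0) hqmem
    have harea : pvArea h i j = min (h.getD i 0) (h.getD j 0) * (((j - i - 1 : Nat) : Int) + 1) := by
      unfold pvArea
      congr 1
      push_cast [Nat.cast_sub (by omega : 1 ≤ j - i), Nat.cast_sub (le_of_lt hij)]
      ring
    rw [harea]
    exact hle
  · rcases h3 with heq | ⟨p, hp, q, hq, hval⟩
    · left; exact heq
    · right
      rw [PySem.List.mem_enumerate_iff] at hp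
      obtain ⟨k, hk, rfl⟩ := hp
      simp only [zero_add] at hq ⊢
      rw [inner_mem_decode h k hk] at hq
      obtain ⟨m, hm, rfl⟩ := hq
      refine ⟨k, k + 1 + m, by omega, hm, ?_⟩
      rw [hval]
      unfold pvArea
      rw [List.getD_eq_getElem h 0 hk]
      simp only
      congr 1
      push_cast
      ring

-- the two-pointer invariant: acc already dominates every pair outside the window [l, r]
theorem twoPtr_best (h : List Int) :
    ∀ (d l r : Nat) (acc : Int), r - l ≤ d → r < h.length → 1 ≤ acc →
      (∀ i j, i < j → j < h.length → ¬(l ≤ i ∧ j ≤ r) → pvArea h i j ≤ acc) →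
      (acc = 1 ∨ ∃ i j, i < j ∧ j < h.length ∧ acc = pvArea h i j) →
      pvBest h (pvTwoPtr h l r acc) := by
  intro d
  induction d with
  | zero =>
    intro l r acc hd hr h1 hb ha
    have hnl : ¬ l < r := by omega
    rw [pvTwoPtr, dif_neg hnl]
    refine ⟨h1, ?_, ha⟩
    intro i j hij hj
    exact hb i j hij hj (by omega)
  | succ d ih =>
    intro l r acc hd hr h1 hb ha
    by_cases hlr : l < r
    · rw [pvTwoPtr, dif_pos hlr]
      show pvBest h
        (if h.getD l 0 ≤ h.getD r 0 then
          pvTwoPtr h (l + 1) r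
            (if min (h.getD l 0) (h.getD r 0) * ((r : Int) - (l : Int)) > acc then
              min (h.getD l 0) (h.getD r 0) * ((r : Int) - (l : Int)) else acc)
        else
          pvTwoPtr h l (r - 1)
            (if min (h.getD l 0) (h.getD r 0) * ((r : Int) - (l : Int)) > acc then
              min (h.getD l 0) (h.getD r 0) * ((r : Int) - (l : Int)) else acc))
      have hArea : min (h.getD l 0) (h.getD r 0) * ((r : Int) - (l : Int)) = pvArea h l r := rfl
      generalize hbg : (if min (h.getD l 0) (h.getD r 0) * ((r : Int) - (l : Int)) > acc then
          min (h.getD l 0) (h.getD r 0) * ((r : Int) - (l : Int)) else acc) = best'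
      have hacc_le : acc ≤ best' := by rw [← hbg]; split_ifs <;> omega
      have harea_le : pvArea h l r ≤ best' := by
        rw [← hbg, hArea]; split_ifs <;> omega
      have h1' : 1 ≤ best' := le_trans h1 hacc_le
      have ha' : best' = 1 ∨ ∃ i j, i < j ∧ j < h.length ∧ best' = pvArea h i j := by
        rw [← hbg, hArea]; split_ifs
        · right; exact ⟨l, r, hlr, hr, rfl⟩
        · exact ha
      split_ifs with hcmp
      · -- move the left pointer: the shorter line is at l
        refine ih (l + 1) r best' (by clear ha ha'; omega) hr h1' ?_ ha'
        intro i j hij hj hout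
        by_cases hold : l ≤ i ∧ j ≤ r
        · have hi : i = l := by omega
          rw [hi]
          have hlj : l < j := by omega
          have hjr : j ≤ r := hold.2
          have hmin : min (h.getD l 0) (h.getD j 0) ≤ h.getD l 0 := min_le_left _ _
          by_cases hjeq : j = r
          · rw [hjeq]; exact harea_le
          · by_cases hnn : 0 ≤ h.getD l 0
            · have step1 : pvArea h l j ≤ h.getD l 0 * ((j : Int) - (l : Int)) :=
                mul_le_mul_of_nonneg_right hmin (by push_cast; omega)
              have step2 : h.getD l 0 * ((j : Int) - (l : Int)) ≤ h.getD l 0 * ((r : Int) - (l : Int)) :=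
                mul_le_mul_of_nonneg_left (by push_cast; omega) hnn
              have step3 : h.getD l 0 * ((r : Int) - (l : Int)) = pvArea h l r := by
                rw [← hArea, min_eq_left hcmp]
              calc pvArea h l j ≤ _ := step1
                _ ≤ _ := step2
                _ = pvArea h l r := step3
                _ ≤ best' := harea_le
            · rw [not_le] at hnn
              have hk : (1 : Int) ≤ (j : Int) - (l : Int) := by push_cast; omega
              have hneg : pvArea h l j ≤ min (h.getD l 0) (h.getD j 0) := by
                unfold pvArea
                nlinarith [min_le_left (h.getD l 0) (h.getD j 0)]
              have hlt : pvArea h l j < 1 := by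
                have := min_le_left (h.getD l 0) (h.getD j 0); omega
              omega
        · exact le_trans (hb i j hij hj hold) hacc_le
      · -- move the right pointer: the shorter line is at r
        rw [not_le] at hcmp
        refine ih l (r - 1) best' (by clear ha ha'; omega) (by clear ha ha'; omega) h1' ?_ ha'
        intro i j hij hj hout
        by_cases hold : l ≤ i ∧ j ≤ r
        · have hj2 : j = r := by omega
          rw [hj2]
          have hir : i < r := by omega
          have hli : l ≤ i := hold.1
          have hmin : min (h.getD i 0) (h.getD r 0) ≤ h.getD r 0 := min_le_right _ _
          by_cases hieq : i = l
          · rw [hieq]; exact harea_le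
          · by_cases hnn : 0 ≤ h.getD r 0
            · have step1 : pvArea h i r ≤ h.getD r 0 * ((r : Int) - (i : Int)) :=
                mul_le_mul_of_nonneg_right hmin (by push_cast; omega)
              have step2 : h.getD r 0 * ((r : Int) - (i : Int)) ≤ h.getD r 0 * ((r : Int) - (l : Int)) :=
                mul_le_mul_of_nonneg_left (by push_cast; omega) hnn
              have step3 : h.getD r 0 * ((r : Int) - (l : Int)) = pvArea h l r := by
                rw [← hArea, min_eq_right (le_of_lt hcmp)]
              calc pvArea h i r ≤ _ := step1
                _ ≤ _ := step2
                _ = pvArea h l r := step3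
                _ ≤ best' := harea_le
            · rw [not_le] at hnn
              have hk : (1 : Int) ≤ (r : Int) - (i : Int) := by push_cast; omega
              have hneg : pvArea h i r ≤ min (h.getD i 0) (h.getD r 0) := by
                unfold pvArea
                nlinarith [min_le_right (h.getD i 0) (h.getD r 0)]
              have hlt : pvArea h i r < 1 := by
                have := min_le_right (h.getD i 0) (h.getD r 0); omega
              omega
        · exact le_trans (hb i j hij hj hold) hacc_le
    · rw [pvTwoPtr, dif_neg hlr]
      refine ⟨h1, ?_, ha⟩
      intro i j hij hj
      exact hb i j hij hj (by omega)

-- port B computes a value with the pvBest characterisation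
theorem pvBest_B (h : List Int) : pvBest h (max_area_brutal_alt h) := by
  unfold max_area_brutal_alt
  rcases h with _ | ⟨x, t⟩
  · rw [pvTwoPtr]
    simp only [List.length_nil]
    refine ⟨le_refl _, ?_, Or.inl rfl⟩
    intro i j _ hj
    simp at hj
  · apply twoPtr_best (x :: t) ((x :: t).length - 1) 0 ((x :: t).length - 1) 1
    · omega
    · simp
    · omega
    · intro i j hij hj hout
      exfalso; apply hout; omega
    · exact Or.inl rfl

-- ===== VERDICT (by name: the statement is the Claim_ definition above) =====
theorem max_area_brutal_spec : Claim_equal_max_area_brutal := by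
  intro height _
  unfold Spec_max_area_brutal
  exact pvBest_unique (pvBest_A height) (pvBest_B height)
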